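-- pv_equiv track=rewrite | github.com/Penn-Playbill-Data/ocr_requests | ocr_requests.py | assemble_double_links
-- ===== SOURCE A (Python) =====
-- def assemble_double_links(base, length, ext):
--     links = []
--     double_pages = 0
--     for i in range(int(length)):
--         for j in range(2):
--             index = i + 1
--             page = "%04d" % (int(index))
--             link = "{}{}-{}{}".format(base, page, double_pages, ext)
--             links.append(link)
--             if j == 0:
--                 double_pages += 1
--     return links
-- ===== SOURCE B (Python) =====
-- def assemble_double_links(base, length, ext):
--     # One flat pass over 2*n link slots; page number and label are closed-form
--     # functions of the slot index k: page = k//2 + 1, label = (k+1)//2.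
--     return ["{}{}-{}{}".format(base, "%04d" % (k // 2 + 1), (k + 1) // 2, ext)
--             for k in range(2 * int(length))]
-- ===== Notes on version B (the rewrite author's own statement) =====
-- stated objective: simpler
-- what changed: Replaces the nested loop with its mutable double_pages counter by one flat comprehension over the 2n link slots, deriving page number (k//2+1) and label ((k+1)//2) in closed form from the slot index.
import Mathlib
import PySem

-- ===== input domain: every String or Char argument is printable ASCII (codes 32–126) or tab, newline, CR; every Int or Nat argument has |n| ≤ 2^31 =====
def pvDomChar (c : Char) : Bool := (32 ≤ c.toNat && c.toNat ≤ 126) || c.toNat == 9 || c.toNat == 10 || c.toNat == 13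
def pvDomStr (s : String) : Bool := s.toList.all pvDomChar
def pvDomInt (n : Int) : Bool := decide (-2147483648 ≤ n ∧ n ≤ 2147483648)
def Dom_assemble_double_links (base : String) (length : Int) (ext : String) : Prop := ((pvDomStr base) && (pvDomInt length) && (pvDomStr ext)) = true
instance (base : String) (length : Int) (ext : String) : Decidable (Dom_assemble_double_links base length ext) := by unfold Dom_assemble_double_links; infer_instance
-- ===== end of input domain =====

-- B replaces the nested loop and mutable double_pages counter by one flat pass over the
-- 2n link slots, computing page (k//2+1) and label ((k+1)//2) in closed form (objective: simpler).

-- ===== PORT A =====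
-- "%04d" % n  is exactly str(n).zfill(4) for an int n (zero-pad to width 4, sign in front)
def assemble_double_links (base : String) (length : Int) (ext : String) : List String :=
  ((PySem.List.pyRange 0 length 1).foldl (fun st i =>
      (PySem.List.pyRange 0 2 1).foldl (fun st2 j =>
        let index := i + 1
        let page := PySem.Str.zfill (PySem.Int.toStr index) 4
        let link := base ++ page ++ "-" ++ PySem.Int.toStr st2.2 ++ ext
        (st2.1 ++ [link], if j == 0 then st2.2 + 1 else st2.2)) st)
    (([] : List String), (0 : Int))).1

-- ===== PORT B =====
def assemble_double_links_alt (base : String) (length : Int) (ext : String) : List String :=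
  (PySem.List.pyRange 0 (2 * length) 1).map (fun k =>
    base ++ PySem.Str.zfill (PySem.Int.toStr (PySem.Int.floordiv k 2 + 1)) 4 ++ "-" ++
      PySem.Int.toStr (PySem.Int.floordiv (k + 1) 2) ++ ext)

-- ===== PRECONDITION & SPEC =====
def Spec_assemble_double_links (base : String) (length : Int) (ext : String) (out : List String) : Prop := out = assemble_double_links_alt base length ext
instance (base : String) (length : Int) (ext : String) (out : List String) : Decidable (Spec_assemble_double_links base length ext out) := by unfold Spec_assemble_double_links; infer_instance

-- ===== CLAIM (what is proved, stated in full; the proofs are below) =====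
def Claim_equal_assemble_double_links : Prop := ∀ (base : String) (length : Int) (ext : String), Dom_assemble_double_links base length ext → Spec_assemble_double_links base length ext (assemble_double_links base length ext)

-- ===== LEMMAS AND PROOFS =====

-- A's loop invariant: starting the outer loop at index a with double_pages = a and links = acc
-- yields acc ++ a flatMap of two-link blocks, and double_pages ends at a + n
theorem adl_inv (base ext : String) : ∀ (n : Nat) (a : Int) (acc : List String),
    (PySem.List.pyRange a (a + n) 1).foldl (fun st i =>
      (PySem.List.pyRange 0 2 1).foldl (fun st2 j =>
        let index := i + 1
        let page := PySem.Str.zfill (PySem.Int.toStr index) 4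
        let link := base ++ page ++ "-" ++ PySem.Int.toStr st2.2 ++ ext
        (st2.1 ++ [link], if j == 0 then st2.2 + 1 else st2.2)) st)
      (acc, a)
    = (acc ++ (PySem.List.pyRange a (a + n) 1).flatMap (fun i =>
        let page := PySem.Str.zfill (PySem.Int.toStr (i + 1)) 4
        [base ++ page ++ "-" ++ PySem.Int.toStr i ++ ext,
         base ++ page ++ "-" ++ PySem.Int.toStr (i + 1) ++ ext]), a + n) := by
  intro n
  induction n with
  | zero =>
    intro a acc
    simp only [Nat.cast_zero, add_zero]
    rw [PySem.List.pyRange_one_eq_nil le_rfl]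
    simp
  | succ n ih =>
    intro a acc
    push_cast
    have hcons := PySem.List.pyRange_one_cons (a := a) (b := a + (n + 1)) (by omega)
    rw [hcons, List.foldl_cons, List.flatMap_cons]
    have h2 : PySem.List.pyRange 0 2 1 = [0, 1] := by decide
    rw [h2]
    simp only [List.foldl_cons, List.foldl_nil]
    have harg : a + (1 : Int) + (n : Int) = a + ((n : Nat) + 1 : Nat) := by push_cast; ring
    have := ih (a + 1) (acc ++ [base ++ PySem.Str.zfill (PySem.Int.toStr (a + 1)) 4 ++ "-" ++ PySem.Int.toStr a ++ ext,
      base ++ PySem.Str.zfill (PySem.Int.toStr (a + 1)) 4 ++ "-" ++ PySem.Int.toStr (a + 1) ++ ext])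
    rw [harg, h2] at this
    simp only [List.foldl_cons, List.foldl_nil] at this
    simp only [beq_self_eq_true, if_true, show ((1:Int) == 0) = false from rfl, Bool.false_eq_true, if_false,
      Nat.cast_add, Nat.cast_one, List.append_assoc, List.cons_append, List.nil_append] at this ⊢
    rw [this]

-- B's flat map over 2n slots equals A's two-link blocks, pairing each even slot with the next
theorem adl_pair (base ext : String) : ∀ (n : Nat) (a : Int),
    (PySem.List.pyRange (2 * a) (2 * a + 2 * n) 1).map (fun k =>
      base ++ PySem.Str.zfill (PySem.Int.toStr (PySem.Int.floordiv k 2 + 1)) 4 ++ "-" ++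
        PySem.Int.toStr (PySem.Int.floordiv (k + 1) 2) ++ ext)
    = (PySem.List.pyRange a (a + n) 1).flatMap (fun i =>
        let page := PySem.Str.zfill (PySem.Int.toStr (i + 1)) 4
        [base ++ page ++ "-" ++ PySem.Int.toStr i ++ ext,
         base ++ page ++ "-" ++ PySem.Int.toStr (i + 1) ++ ext]) := by
  intro n
  induction n with
  | zero =>
    intro a
    simp only [Nat.cast_zero, mul_zero, add_zero]
    rw [PySem.List.pyRange_one_eq_nil le_rfl, PySem.List.pyRange_one_eq_nil le_rfl]
    simp
  | succ n ih =>
    intro a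
    push_cast
    have hc1 := PySem.List.pyRange_one_cons (a := 2 * a) (b := 2 * a + 2 * (n + 1)) (by omega)
    have hc2 := PySem.List.pyRange_one_cons (a := 2 * a + 1) (b := 2 * a + 2 * (n + 1)) (by omega)
    have hc3 := PySem.List.pyRange_one_cons (a := a) (b := a + (n + 1)) (by omega)
    rw [hc1, hc2, hc3, List.map_cons, List.map_cons, List.flatMap_cons]
    have e1 : PySem.Int.floordiv (2 * a) 2 = a :=
      (PySem.Int.floordiv_eq_iff_of_pos (by omega)).mpr (by omega)
    have e2 : PySem.Int.floordiv (2 * a + 1) 2 = a :=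
      (PySem.Int.floordiv_eq_iff_of_pos (by omega)).mpr (by omega)
    have e3 : PySem.Int.floordiv (2 * a + 1 + 1) 2 = a + 1 :=
      (PySem.Int.floordiv_eq_iff_of_pos (by omega)).mpr (by omega)
    rw [e1, e2, e3]
    rw [show (2 : Int) * a + 1 + 1 = 2 * (a + 1) by ring,
       show (2 : Int) * a + 2 * ((n : Int) + 1) = 2 * (a + 1) + 2 * (n : Int) by ring,
       show a + ((n : Int) + 1) = a + 1 + (n : Int) by ring, ih (a + 1)]
    simp

-- ===== VERDICT (by name: the statement is the Claim_ definition above) =====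
theorem assemble_double_links_spec : Claim_equal_assemble_double_links := by
  intro base length ext _
  unfold Spec_assemble_double_links assemble_double_links assemble_double_links_alt
  by_cases h : length ≤ 0
  · rw [PySem.List.pyRange_one_eq_nil h, PySem.List.pyRange_one_eq_nil (by omega : 2 * length ≤ 0)]
    simp
  · have hlen : length = 0 + (length.toNat : Int) := by omega
    rw [hlen, congrArg Prod.fst (adl_inv base ext length.toNat 0 [])]
    have := adl_pair base ext length.toNat 0
    simp only [mul_zero, zero_add] at this
    simp only [List.nil_append, zero_add]
    exact this.symm
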